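-- pv_equiv track=rewrite | github.com/rbachati/dna_sequence_alignment | similarityalgo.py | identify_chained_sequences
-- ===== SOURCE A (Python) =====
-- def identify_chained_sequences(sequence1, sequence2):
--     chained_sequences = []
--     chain = ""
--     for a, b in zip(sequence1, sequence2):
--         if a == b:
--             chain += a
--         else:
--             if chain:
--                 chained_sequences.append(chain)
--                 chain = ""
--     if chain: # if the chain extends to the end
--         chained_sequences.append(chain)
--     return chained_sequences
-- ===== SOURCE B (Python) =====
-- def identify_chained_sequences(sequence1, sequence2):
--     # Stage 1: one string where every mismatching position becomes a NUL sentinel.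
--     marked = "".join(a if a == b else "\x00" for a, b in zip(sequence1, sequence2))
--     # Stage 2: the runs are exactly the nonempty pieces between sentinels.
--     return [run for run in marked.split("\x00") if run]
-- ===== Notes on version B (the rewrite author's own statement) =====
-- stated objective: alternative
-- what changed: Instead of A's accumulate-and-flush state machine, B builds one sentinel-marked string (matching char, or NUL at mismatches) in a first pass and then obtains the runs as the nonempty pieces of its split on the sentinel.
import Mathlib
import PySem

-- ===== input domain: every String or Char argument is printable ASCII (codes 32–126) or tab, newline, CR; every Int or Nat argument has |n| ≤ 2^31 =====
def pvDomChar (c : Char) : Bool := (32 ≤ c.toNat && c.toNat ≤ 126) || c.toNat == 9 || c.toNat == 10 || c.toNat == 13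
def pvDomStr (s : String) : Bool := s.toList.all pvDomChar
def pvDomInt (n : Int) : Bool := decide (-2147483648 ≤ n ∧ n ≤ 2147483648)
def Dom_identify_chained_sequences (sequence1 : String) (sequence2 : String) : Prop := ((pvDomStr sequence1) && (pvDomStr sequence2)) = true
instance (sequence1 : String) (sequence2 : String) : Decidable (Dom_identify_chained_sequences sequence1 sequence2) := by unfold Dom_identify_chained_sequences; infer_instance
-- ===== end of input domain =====

-- B replaces A's accumulate-and-flush state machine by two staged passes: build one
-- sentinel-marked string (NUL at mismatches), then split on the sentinel and keep the
-- nonempty pieces (alternative decomposition; same cost).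

-- ===== PORT A =====
-- A's loop: state is (accumulated result, current chain of matching chars).
def icsLoop : List (Char × Char) → List String → List Char → List String
  | [], acc, chain =>
      if chain.isEmpty then acc else acc ++ [String.ofList chain]
  | (a, b) :: rest, acc, chain =>
      if a == b then icsLoop rest acc (chain ++ [a])
      else if chain.isEmpty then icsLoop rest acc chain
      else icsLoop rest (acc ++ [String.ofList chain]) []

def identify_chained_sequences (sequence1 : String) (sequence2 : String) : List String :=
  icsLoop (sequence1.toList.zip sequence2.toList) [] []

-- ===== PORT B =====
-- the "\x00" sentinel of Source B
def icsNul : Char := Char.ofNat 0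

def identify_chained_sequences_alt (sequence1 : String) (sequence2 : String) : List String :=
  -- marked = "".join(a if a == b else "\x00" for a, b in zip(sequence1, sequence2))
  -- [run for run in marked.split("\x00") if run]   (str.split with a one-char separator)
  ((PySem.Chars.splitOn
      ((sequence1.toList.zip sequence2.toList).map (fun p => if p.1 == p.2 then p.1 else icsNul))
      [icsNul]).filter (fun r => !r.isEmpty)).map String.ofList

-- ===== PRECONDITION & SPEC =====
def Spec_identify_chained_sequences (sequence1 : String) (sequence2 : String) (out : List String) : Prop := out = identify_chained_sequences_alt sequence1 sequence2
instance (sequence1 : String) (sequence2 : String) (out : List String) : Decidable (Spec_identify_chained_sequences sequence1 sequence2 out) := by unfold Spec_identify_chained_sequences; infer_instance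

-- ===== CLAIM (what is proved, stated in full; the proofs are below) =====
def Claim_equal_identify_chained_sequences : Prop := ∀ (sequence1 : String) (sequence2 : String), Dom_identify_chained_sequences sequence1 sequence2 → Spec_identify_chained_sequences sequence1 sequence2 (identify_chained_sequences sequence1 sequence2)

-- ===== LEMMAS AND PROOFS =====

-- splitting on the single char icsNul, with an accumulator of the current (reversed) piece
def icsSplitC : List Char → List Char → List (List Char)
  | [], cur => [cur.reverse]
  | ch :: rest, cur =>
      if ch == icsNul then cur.reverse :: icsSplitC rest []
      else icsSplitC rest (ch :: cur)

theorem icsGo (fuel : Nat) : ∀ (l cur : List Char) (acc : List (List Char)),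
    l.length < fuel →
    PySem.Chars.splitOn.go [icsNul] fuel l cur acc = acc.reverse ++ icsSplitC l cur := by
  induction fuel with
  | zero => intro l cur acc h; omega
  | succ n ih =>
      intro l cur acc h
      match l with
      | [] => simp [PySem.Chars.splitOn.go, icsSplitC]
      | ch :: rest =>
          rw [PySem.Chars.splitOn.go]
          by_cases hc : ch = icsNul
          · have hpre : List.isPrefixOf [icsNul] (ch :: rest) = true := by
              simp [List.isPrefixOf, hc]
            simp only [hpre, if_pos]
            subst hc
            simp only [List.length_cons, List.drop_succ_cons, List.length_nil, List.drop_zero]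
            rw [ih rest [] (cur.reverse :: acc) (by simpa using Nat.lt_of_succ_lt_succ h)]
            simp [icsSplitC]
          · have hpre : List.isPrefixOf [icsNul] (ch :: rest) = false := by
              simp [List.isPrefixOf]; exact fun hh => (hc hh.symm).elim
            simp only [hpre, Bool.false_eq_true, if_false]
            rw [ih rest (ch :: cur) acc (by simpa using Nat.lt_of_succ_lt_succ h)]
            have : (ch == icsNul) = false := by simp [hc]
            simp [icsSplitC, this]

theorem icsSplitOn_eq (cs : List Char) :
    PySem.Chars.splitOn cs [icsNul] = icsSplitC cs [] := by
  rw [PySem.Chars.splitOn]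
  exact icsGo (cs.length + 1) cs [] [] (Nat.lt_succ_self _)

def icsEmit (xs : List (List Char)) : List String :=
  (xs.filter (fun r => !r.isEmpty)).map String.ofList

theorem icsLoop_acc (l : List (Char × Char)) : ∀ (acc : List String) (c : List Char),
    icsLoop l acc c = acc ++ icsLoop l [] c := by
  induction l with
  | nil => intro acc c; simp [icsLoop]; split <;> simp
  | cons p rest ih =>
      intro acc c
      obtain ⟨a, b⟩ := p
      simp only [icsLoop]
      split
      · exact ih acc _
      · split
        · exact ih acc c
        · rw [ih (acc ++ [String.ofList c]) []]
          simp only [List.nil_append]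
          rw [ih [String.ofList c] []]
          simp

theorem icsLoop_split (l : List (Char × Char)) :
    ∀ (chain : List Char),
    (∀ p ∈ l, p.1 = p.2 → p.1 ≠ icsNul) →
    icsLoop l [] chain =
      icsEmit (icsSplitC (l.map (fun p => if p.1 == p.2 then p.1 else icsNul)) chain.reverse) := by
  induction l with
  | nil =>
      intro chain _
      simp only [icsLoop, List.map_nil, icsSplitC, List.reverse_reverse, icsEmit]
      by_cases hc : chain.isEmpty
      · have : chain = [] := by simpa [List.isEmpty_iff] using hc
        subst this; simp
      · simp [hc, List.filter, List.map]
  | cons p rest ih =>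
      intro chain hnul
      obtain ⟨a, b⟩ := p
      simp only [icsLoop, List.map_cons]
      by_cases hab : a = b
      · have habb : (a == b) = true := by simp [hab]
        have hanul : (a == icsNul) = false := by
          simp [hnul (a, b) (List.mem_cons_self) hab]
        simp only [habb, if_pos, icsSplitC, hanul, Bool.false_eq_true, if_false]
        rw [ih (chain ++ [a]) (fun q hq => hnul q (List.mem_cons_of_mem _ hq))]
        simp
      · have habb : (a == b) = false := by simp [hab]
        simp only [habb, Bool.false_eq_true, if_false, icsSplitC, BEq.rfl, if_pos,
          List.reverse_reverse]
        by_cases hc : chain.isEmpty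
        · have hce : chain = [] := by simpa [List.isEmpty_iff] using hc
          subst hce
          simp only [if_pos, List.isEmpty_nil]
          rw [ih [] (fun q hq => hnul q (List.mem_cons_of_mem _ hq))]
          simp [icsEmit, List.filter]
        · have hce : chain ≠ [] := by simpa [List.isEmpty_iff] using hc
          simp only [hc, Bool.false_eq_true, if_false]
          rw [icsLoop_acc, ih [] (fun q hq => hnul q (List.mem_cons_of_mem _ hq))]
          have : chain.isEmpty = false := by simpa using hc
          simp [icsEmit, List.filter, this]

-- ===== VERDICT (by name: the statement is the Claim_ definition above) =====
theorem identify_chained_sequences_spec : Claim_equal_identify_chained_sequences := by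
  intro s1 s2 hdom
  show identify_chained_sequences s1 s2 = identify_chained_sequences_alt s1 s2
  unfold identify_chained_sequences identify_chained_sequences_alt
  have hnul : ∀ p ∈ s1.toList.zip s2.toList, p.1 = p.2 → p.1 ≠ icsNul := by
    intro p hp _
    have h1 : p.1 ∈ s1.toList := (List.of_mem_zip hp).1
    have hd : pvDomStr s1 = true := by
      unfold Dom_identify_chained_sequences at hdom
      simp only [Bool.and_eq_true] at hdom
      exact hdom.1
    have := (List.all_eq_true.mp hd) _ h1
    intro he
    rw [he] at this
    simp [pvDomChar, icsNul] at this
  rw [icsLoop_split _ [] hnul, icsSplitOn_eq]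
  simp [icsEmit]
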